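-- pv_equiv track=rewrite | github.com/mstaczek/Labyrinth | game.py | make_all_rotations_of_tile
-- ===== SOURCE A (Python) =====
-- ordered_rotated_keys = {'u': 1, 'U': 2, 'r': 3, 'R': 4, 'd': 5, 'D': 6, 'l': 7, 'L': 8}
--
-- def make_all_rotations_of_tile(code):
--     order_small = ['u', 'r', 'd', 'l']
--     order_large = ['U', 'R', 'D', 'L']
--
--     letters_in_key = [letter for letter in code]
--     rotated_90 = ''
--     rotated_180 = ''
--     rotated_270 = ''
--     for letter in letters_in_key:
--         if letter in order_small:
--             rotated_90 += order_small[(order_small.index(letter) + 1) % 4]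
--             rotated_180 += order_small[(order_small.index(letter) + 2) % 4]
--             rotated_270 += order_small[(order_small.index(letter) + 3) % 4]
--         elif letter in order_large:
--             rotated_90 += order_large[(order_large.index(letter) + 1) % 4]
--             rotated_180 += order_large[(order_large.index(letter) + 2) % 4]
--             rotated_270 += order_large[(order_large.index(letter) + 3) % 4]
--     rotated_90 = ''.join(sorted(rotated_90, key=lambda x: ordered_rotated_keys[x]))
--     rotated_180 = ''.join(sorted(rotated_180, key=lambda x: ordered_rotated_keys[x]))
--     rotated_270 = ''.join(sorted(rotated_270, key=lambda x: ordered_rotated_keys[x]))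
--     return code, rotated_90, rotated_180, rotated_270
-- ===== SOURCE B (Python) =====
-- def make_all_rotations_of_tile(code):
--     # One counting pass, then each rotation is emitted directly in key order
--     # (u,U,r,R,d,D,l,L) as repeated letters -- no per-rotation sort needed.
--     counts = {}
--     for ch in code:
--         counts[ch] = counts.get(ch, 0) + 1
--     small = 'urdl'
--     large = 'URDL'
--     def rotated(k):
--         parts = []
--         for i in range(4):
--             parts.append(small[i] * counts.get(small[(i + 4 - k) % 4], 0))
--             parts.append(large[i] * counts.get(large[(i + 4 - k) % 4], 0))
--         return ''.join(parts)
--     return code, rotated(1), rotated(2), rotated(3)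
-- ===== Notes on version B (the rewrite author's own statement) =====
-- stated objective: faster
-- what changed: B makes one counting pass over the code and emits each of the three rotations directly in key order as repeated letters, instead of A's per-letter shift-list lookups producing three strings that are each sorted by a key dictionary.
import Mathlib
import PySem

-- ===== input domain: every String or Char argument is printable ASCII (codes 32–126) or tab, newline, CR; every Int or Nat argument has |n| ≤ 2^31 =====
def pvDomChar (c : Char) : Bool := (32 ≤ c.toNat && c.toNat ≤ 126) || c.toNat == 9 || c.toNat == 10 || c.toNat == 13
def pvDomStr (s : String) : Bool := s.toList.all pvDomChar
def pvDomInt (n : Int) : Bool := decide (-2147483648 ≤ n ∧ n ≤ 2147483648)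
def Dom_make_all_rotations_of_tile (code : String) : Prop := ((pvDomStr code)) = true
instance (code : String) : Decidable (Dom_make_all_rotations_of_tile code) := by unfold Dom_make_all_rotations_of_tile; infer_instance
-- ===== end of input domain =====

-- B replaces A's per-letter shift lists and three key-sorts by one counting pass over the
-- code and direct emission of each rotation in key order (no sorting); objective: faster
-- (measured).

-- ===== PORT A =====
-- module-level constant ordered_rotated_keys
def pvOrderedRotatedKeys : PySem.Dict Char Int :=
  PySem.Dict.ofList [('u',1),('U',2),('r',3),('R',4),('d',5),('D',6),('l',7),('L',8)]

def pvOrderSmall : List Char := ['u', 'r', 'd', 'l']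
def pvOrderLarge : List Char := ['U', 'R', 'D', 'L']

-- sort key lambda x: ordered_rotated_keys[x]; the lookup never misses on the letters A sorts
-- (they all come from the two order lists), so getD 0 is exact there
def pvKeyA (c : Char) : Int := pvOrderedRotatedKeys.getD c 0

-- the body of A's for-loop over letters_in_key; the accumulators are the three rotated strings
-- as lists of characters ('' → [], += letter → ++ [letter])
def pvStepA (acc : List Char × List Char × List Char) (letter : Char) :
    List Char × List Char × List Char :=
  if letter ∈ pvOrderSmall then
    -- membership was just checked, so .index succeeds (getD 0 is exact); indices (i+j)%4 < 4,
    -- so the list indexing is in range (getD ' ' is exact)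
    let i := (PySem.List.index? pvOrderSmall letter).getD 0
    (acc.1 ++ [pvOrderSmall.getD ((i + 1) % 4) ' '],
     acc.2.1 ++ [pvOrderSmall.getD ((i + 2) % 4) ' '],
     acc.2.2 ++ [pvOrderSmall.getD ((i + 3) % 4) ' '])
  else if letter ∈ pvOrderLarge then
    let i := (PySem.List.index? pvOrderLarge letter).getD 0
    (acc.1 ++ [pvOrderLarge.getD ((i + 1) % 4) ' '],
     acc.2.1 ++ [pvOrderLarge.getD ((i + 2) % 4) ' '],
     acc.2.2 ++ [pvOrderLarge.getD ((i + 3) % 4) ' '])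
  else acc

def make_all_rotations_of_tile (code : String) : String × String × String × String :=
  let letters_in_key := code.toList
  let st := letters_in_key.foldl pvStepA ([], [], [])
  let rotated_90 := String.ofList (PySem.List.sorted st.1 pvKeyA)
  let rotated_180 := String.ofList (PySem.List.sorted st.2.1 pvKeyA)
  let rotated_270 := String.ofList (PySem.List.sorted st.2.2 pvKeyA)
  (code, rotated_90, rotated_180, rotated_270)

-- ===== PORT B =====
-- counts[ch] = counts.get(ch, 0) + 1 over the code
def pvCountsB (code : String) : PySem.Dict Char Int :=
  code.toList.foldl (fun d x => d.insert x (d.getD x 0 + 1)) PySem.Dict.empty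

-- rotated(k): for i in range(4), emit small[i] * counts.get(small[(i+4-k)%4], 0) and the same
-- for large; counts are nonnegative, so .toNat on the stored Int count is exact, and all the
-- indices are < 4, so getD ' ' indexing is exact
def pvRotatedB (counts : PySem.Dict Char Int) (k : Nat) : String :=
  let small : List Char := ['u', 'r', 'd', 'l']
  let large : List Char := ['U', 'R', 'D', 'L']
  let parts := (List.range 4).foldl (fun acc i =>
    acc ++ List.replicate (counts.getD (small.getD ((i + 4 - k) % 4) ' ') 0).toNat (small.getD i ' ')
        ++ List.replicate (counts.getD (large.getD ((i + 4 - k) % 4) ' ') 0).toNat (large.getD i ' ')) []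
  String.ofList parts

def make_all_rotations_of_tile_alt (code : String) : String × String × String × String :=
  let counts := pvCountsB code
  (code, pvRotatedB counts 1, pvRotatedB counts 2, pvRotatedB counts 3)

-- ===== PRECONDITION & SPEC =====
def Spec_make_all_rotations_of_tile (code : String) (out : String × String × String × String) : Prop := out = make_all_rotations_of_tile_alt code
instance (code : String) (out : String × String × String × String) : Decidable (Spec_make_all_rotations_of_tile code out) := by unfold Spec_make_all_rotations_of_tile; infer_instance

-- ===== CLAIM (what is proved, stated in full; the proofs are below) =====
def Claim_equal_make_all_rotations_of_tile : Prop := ∀ (code : String), Dom_make_all_rotations_of_tile code → Spec_make_all_rotations_of_tile code (make_all_rotations_of_tile code)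

-- ===== LEMMAS AND PROOFS =====

-- the per-letter action of A's loop on one rotated string: shift by k in its 4-cycle, or skip
def pvRot (k : Nat) (c : Char) : Option Char :=
  if c ∈ pvOrderSmall then
    some (pvOrderSmall.getD (((PySem.List.index? pvOrderSmall c).getD 0 + k) % 4) ' ')
  else if c ∈ pvOrderLarge then
    some (pvOrderLarge.getD (((PySem.List.index? pvOrderLarge c).getD 0 + k) % 4) ' ')
  else none

def pvEight : List Char := ['u', 'U', 'r', 'R', 'd', 'D', 'l', 'L']

-- counts-to-list in key order
def pvBlocks (cs : List Char) (v : Char → Nat) : List Char :=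
  cs.flatMap (fun d => List.replicate (v d) d)

def pvCanon (v : Char → Nat) : List Char := pvBlocks pvEight v

def pvBump (c : Char) (v : Char → Nat) : Char → Nat :=
  fun x => if x = c then v x + 1 else v x

-- abbreviate the comparator used by PySem.List.sorted with key pvKeyA
def pvBf : Char → Char → Bool := fun a b => decide (pvKeyA a < pvKeyA b)

lemma pvLoopA (l : List Char) : ∀ a b c : List Char,
    l.foldl pvStepA (a, b, c) =
      (a ++ l.filterMap (pvRot 1), b ++ l.filterMap (pvRot 2), c ++ l.filterMap (pvRot 3)) := by
  induction l with
  | nil => simp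
  | cons x t ih =>
    intro a b c
    by_cases h1 : x ∈ pvOrderSmall
    · simp [pvStepA, pvRot, h1, List.foldl_cons, ih, List.append_assoc]
    · by_cases h2 : x ∈ pvOrderLarge
      · simp [pvStepA, pvRot, h1, h2, List.foldl_cons, ih, List.append_assoc]
      · simp [pvStepA, pvRot, h1, h2, List.foldl_cons, ih]

lemma pvRot_mem_eight {k : Nat} {a c : Char} (h : pvRot k a = some c) : c ∈ pvEight := by
  unfold pvRot at h
  split_ifs at h with h1 h2
  · have h4 : ((PySem.List.index? pvOrderSmall a).getD 0 + k) % 4 < 4 := Nat.mod_lt _ (by norm_num)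
    generalize hj : ((PySem.List.index? pvOrderSmall a).getD 0 + k) % 4 = j at h h4
    rw [List.getD_eq_getElem _ _ (by simpa [pvOrderSmall] using h4)] at h
    rw [Option.some_inj] at h
    subst h
    have hcase : j = 0 ∨ j = 1 ∨ j = 2 ∨ j = 3 := by omega
    rcases hcase with rfl | rfl | rfl | rfl <;> simp [pvOrderSmall, pvEight]
  · have h4 : ((PySem.List.index? pvOrderLarge a).getD 0 + k) % 4 < 4 := Nat.mod_lt _ (by norm_num)
    generalize hj : ((PySem.List.index? pvOrderLarge a).getD 0 + k) % 4 = j at h h4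
    rw [List.getD_eq_getElem _ _ (by simpa [pvOrderLarge] using h4)] at h
    rw [Option.some_inj] at h
    subst h
    have hcase : j = 0 ∨ j = 1 ∨ j = 2 ∨ j = 3 := by omega
    rcases hcase with rfl | rfl | rfl | rfl <;> simp [pvOrderLarge, pvEight]

lemma pvRot_none_of_not_mem (k : Nat) (c : Char) (hc : c ∉ pvEight) : pvRot k c = none := by
  have h1 : c ∉ pvOrderSmall := fun h => hc (by revert h; simp [pvOrderSmall, pvEight]; rintro (rfl|rfl|rfl|rfl) <;> simp)
  have h2 : c ∉ pvOrderLarge := fun h => hc (by revert h; simp [pvOrderLarge, pvEight]; rintro (rfl|rfl|rfl|rfl) <;> simp)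
  simp [pvRot, h1, h2]

lemma pvRot_iff (k : Nat) (x src : Char) (hsrc : src ∈ pvEight)
    (htab : ∀ c ∈ pvEight, (pvRot k c = some x ↔ c = src)) :
    ∀ c : Char, pvRot k c = some x ↔ c = src := by
  intro c
  by_cases hc : c ∈ pvEight
  · exact htab c hc
  · rw [pvRot_none_of_not_mem k c hc]
    constructor
    · intro h; exact absurd h (by simp)
    · rintro rfl; exact absurd hsrc hc

lemma pvCount_filterMap_rot (k : Nat) (x src : Char)
    (h : ∀ c : Char, pvRot k c = some x ↔ c = src) (l : List Char) :
    (l.filterMap (pvRot k)).count x = l.count src := by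
  rw [List.count_filterMap]
  rw [show l.count src = l.countP (fun a => a == src) from rfl]
  apply List.countP_congr
  intro a _
  by_cases hs : a = src
  · subst hs; simp [(h a).mpr rfl]
  · have hne : pvRot k a ≠ some x := fun hh => hs ((h a).mp hh)
    simp [beq_iff_eq, hne, hs]

lemma pvSkipBlock (c d : Char) (h : ¬ pvKeyA c < pvKeyA d) (n : Nat) (rest : List Char) :
    PySem.List.insertBy pvBf c (List.replicate n d ++ rest) =
      List.replicate n d ++ PySem.List.insertBy pvBf c rest := by
  induction n with
  | zero => simp
  | succ n ih =>
    rw [List.replicate_succ, List.cons_append, List.cons_append]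
    show PySem.List.insertBy pvBf c (d :: (List.replicate n d ++ rest)) = _
    rw [show ∀ t, PySem.List.insertBy pvBf c (d :: t) =
          if pvBf c d then c :: d :: t else d :: PySem.List.insertBy pvBf c t from fun t => rfl]
    rw [if_neg (by simp [pvBf, h])]
    rw [ih]

lemma pvInsertTail (c : Char) (cs : List Char) (v : Char → Nat)
    (h : ∀ d ∈ cs, pvKeyA c < pvKeyA d) :
    PySem.List.insertBy pvBf c (pvBlocks cs v) = c :: pvBlocks cs v := by
  induction cs with
  | nil => rfl
  | cons d cs ih =>
    rw [show pvBlocks (d :: cs) v = List.replicate (v d) d ++ pvBlocks cs v from rfl]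
    cases hn : v d with
    | zero => simpa [hn] using ih (fun e he => h e (List.mem_cons_of_mem _ he))
    | succ n =>
      rw [List.replicate_succ, List.cons_append]
      rw [show ∀ t, PySem.List.insertBy pvBf c (d :: t) =
            if pvBf c d then c :: d :: t else d :: PySem.List.insertBy pvBf c t from fun t => rfl]
      rw [if_pos (by simp [pvBf]; exact h d (List.mem_cons_self))]

lemma pvBlocks_bump_of_not_mem (c : Char) (cs : List Char) (v : Char → Nat) (hc : c ∉ cs) :
    pvBlocks cs (pvBump c v) = pvBlocks cs v := by
  induction cs with
  | nil => rfl
  | cons d cs ih =>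
    have hd : d ≠ c := fun h => hc (h ▸ List.mem_cons_self)
    simp only [pvBlocks, List.flatMap_cons] at *
    rw [ih (fun h => hc (List.mem_cons_of_mem _ h))]
    congr 1
    simp [pvBump, hd]

lemma pvInsertBlocks (c : Char) (pre suf : List Char) (v : Char → Nat)
    (hpre : ∀ d ∈ pre, ¬ pvKeyA c < pvKeyA d) (hsuf : ∀ d ∈ suf, pvKeyA c < pvKeyA d)
    (hcpre : c ∉ pre) (hcsuf : c ∉ suf) :
    PySem.List.insertBy pvBf c (pvBlocks (pre ++ c :: suf) v) =
      pvBlocks (pre ++ c :: suf) (pvBump c v) := by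
  induction pre with
  | nil =>
    simp only [List.nil_append]
    rw [show pvBlocks (c :: suf) v = List.replicate (v c) c ++ pvBlocks suf v from rfl]
    rw [pvSkipBlock c c (lt_irrefl _) (v c) _]
    rw [pvInsertTail c suf v hsuf]
    rw [show pvBlocks (c :: suf) (pvBump c v) =
          List.replicate (pvBump c v c) c ++ pvBlocks suf (pvBump c v) from rfl]
    rw [pvBlocks_bump_of_not_mem c suf v hcsuf]
    rw [show pvBump c v c = v c + 1 from by simp [pvBump]]
    rw [List.replicate_succ']
    simp
  | cons d pre ih =>
    have hd : ¬ pvKeyA c < pvKeyA d := hpre d List.mem_cons_self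
    simp only [List.cons_append]
    rw [show pvBlocks (d :: (pre ++ c :: suf)) v = List.replicate (v d) d ++ pvBlocks (pre ++ c :: suf) v from rfl]
    rw [pvSkipBlock c d hd (v d) _]
    rw [ih (fun e he => hpre e (List.mem_cons_of_mem _ he)) (fun h => hcpre (List.mem_cons_of_mem _ h))]
    rw [show pvBlocks (d :: (pre ++ c :: suf)) (pvBump c v) =
          List.replicate (pvBump c v d) d ++ pvBlocks (pre ++ c :: suf) (pvBump c v) from rfl]
    have hdc : d ≠ c := fun h => hcpre (h ▸ List.mem_cons_self)
    rw [show pvBump c v d = v d from by simp [pvBump, hdc]]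

lemma pvInsertCanon (c : Char) (hc : c ∈ pvEight) (v : Char → Nat) :
    PySem.List.insertBy pvBf c (pvCanon v) = pvCanon (pvBump c v) := by
  unfold pvCanon
  fin_cases hc
  · exact pvInsertBlocks 'u' [] ['U','r','R','d','D','l','L'] v (by simp) (by intro d hd; fin_cases hd; all_goals decide) (by decide) (by decide)
  · exact pvInsertBlocks 'U' ['u'] ['r','R','d','D','l','L'] v (by intro d hd; fin_cases hd; all_goals decide) (by intro d hd; fin_cases hd; all_goals decide) (by decide) (by decide)
  · exact pvInsertBlocks 'r' ['u','U'] ['R','d','D','l','L'] v (by intro d hd; fin_cases hd; all_goals decide) (by intro d hd; fin_cases hd; all_goals decide) (by decide) (by decide)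
  · exact pvInsertBlocks 'R' ['u','U','r'] ['d','D','l','L'] v (by intro d hd; fin_cases hd; all_goals decide) (by intro d hd; fin_cases hd; all_goals decide) (by decide) (by decide)
  · exact pvInsertBlocks 'd' ['u','U','r','R'] ['D','l','L'] v (by intro d hd; fin_cases hd; all_goals decide) (by intro d hd; fin_cases hd; all_goals decide) (by decide) (by decide)
  · exact pvInsertBlocks 'D' ['u','U','r','R','d'] ['l','L'] v (by intro d hd; fin_cases hd; all_goals decide) (by intro d hd; fin_cases hd; all_goals decide) (by decide) (by decide)
  · exact pvInsertBlocks 'l' ['u','U','r','R','d','D'] ['L'] v (by intro d hd; fin_cases hd; all_goals decide) (by intro d hd; fin_cases hd; all_goals decide) (by decide) (by decide)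
  · exact pvInsertBlocks 'L' ['u','U','r','R','d','D','l'] [] v (by intro d hd; fin_cases hd; all_goals decide) (by simp) (by decide) (by decide)

lemma pvFoldlCanon (l : List Char) : ∀ v : Char → Nat, (∀ c ∈ l, c ∈ pvEight) →
    l.foldl (fun acc x => PySem.List.insertBy pvBf x acc) (pvCanon v) =
      pvCanon (fun c => v c + l.count c) := by
  induction l with
  | nil => intro v _; simp
  | cons x t ih =>
    intro v h
    rw [List.foldl_cons, pvInsertCanon x (h x List.mem_cons_self) v,
        ih (pvBump x v) (fun c hc => h c (List.mem_cons_of_mem _ hc))]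
    congr 1
    funext c
    by_cases hcx : c = x
    · subst hcx; simp [pvBump]; omega
    · simp [pvBump, hcx, Ne.symm hcx]

lemma pvSortedCanon (l : List Char) (h : ∀ c ∈ l, c ∈ pvEight) :
    PySem.List.sorted l pvKeyA = pvCanon (fun c => l.count c) := by
  rw [PySem.List.sorted_eq_foldl_insertBy l pvKeyA]
  have h0 : pvCanon (fun _ => 0) = ([] : List Char) := rfl
  rw [show (List.foldl (fun acc x => PySem.List.insertBy (fun a b => decide (pvKeyA a < pvKeyA b)) x acc) [] l)
        = List.foldl (fun acc x => PySem.List.insertBy pvBf x acc) (pvCanon (fun _ => 0)) l from by rw [h0]; rfl]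
  rw [pvFoldlCanon l (fun _ => 0) h]
  simp

lemma pvGetD_countsB (code : String) (c : Char) :
    (pvCountsB code).getD c 0 = (code.toList.count c : Int) := by
  unfold pvCountsB
  rw [PySem.Dict.foldl_insert_getD_add_one_eq_counter]
  exact PySem.Dict.getD_counter _ _

lemma pvB1 (code : String) :
    pvRotatedB (pvCountsB code) 1 =
      String.ofList (pvCanon (fun c => (code.toList.filterMap (pvRot 1)).count c)) := by
  have hg : ∀ c, (pvCountsB code).getD c 0 = (code.toList.count c : Int) := pvGetD_countsB code
  have e1 : (code.toList.filterMap (pvRot 1)).count 'u' = code.toList.count 'l' :=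
    pvCount_filterMap_rot 1 'u' 'l' (pvRot_iff 1 'u' 'l' (by decide) (by intro c hc; fin_cases hc; all_goals decide)) _
  have e2 : (code.toList.filterMap (pvRot 1)).count 'U' = code.toList.count 'L' :=
    pvCount_filterMap_rot 1 'U' 'L' (pvRot_iff 1 'U' 'L' (by decide) (by intro c hc; fin_cases hc; all_goals decide)) _
  have e3 : (code.toList.filterMap (pvRot 1)).count 'r' = code.toList.count 'u' :=
    pvCount_filterMap_rot 1 'r' 'u' (pvRot_iff 1 'r' 'u' (by decide) (by intro c hc; fin_cases hc; all_goals decide)) _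
  have e4 : (code.toList.filterMap (pvRot 1)).count 'R' = code.toList.count 'U' :=
    pvCount_filterMap_rot 1 'R' 'U' (pvRot_iff 1 'R' 'U' (by decide) (by intro c hc; fin_cases hc; all_goals decide)) _
  have e5 : (code.toList.filterMap (pvRot 1)).count 'd' = code.toList.count 'r' :=
    pvCount_filterMap_rot 1 'd' 'r' (pvRot_iff 1 'd' 'r' (by decide) (by intro c hc; fin_cases hc; all_goals decide)) _
  have e6 : (code.toList.filterMap (pvRot 1)).count 'D' = code.toList.count 'R' :=
    pvCount_filterMap_rot 1 'D' 'R' (pvRot_iff 1 'D' 'R' (by decide) (by intro c hc; fin_cases hc; all_goals decide)) _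
  have e7 : (code.toList.filterMap (pvRot 1)).count 'l' = code.toList.count 'd' :=
    pvCount_filterMap_rot 1 'l' 'd' (pvRot_iff 1 'l' 'd' (by decide) (by intro c hc; fin_cases hc; all_goals decide)) _
  have e8 : (code.toList.filterMap (pvRot 1)).count 'L' = code.toList.count 'D' :=
    pvCount_filterMap_rot 1 'L' 'D' (pvRot_iff 1 'L' 'D' (by decide) (by intro c hc; fin_cases hc; all_goals decide)) _
  simp [pvRotatedB, pvCanon, pvBlocks, pvEight, List.range_succ, hg, e1, e2, e3, e4, e5, e6, e7, e8,
        List.getD]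

lemma pvB2 (code : String) :
    pvRotatedB (pvCountsB code) 2 =
      String.ofList (pvCanon (fun c => (code.toList.filterMap (pvRot 2)).count c)) := by
  have hg : ∀ c, (pvCountsB code).getD c 0 = (code.toList.count c : Int) := pvGetD_countsB code
  have e1 : (code.toList.filterMap (pvRot 2)).count 'u' = code.toList.count 'd' :=
    pvCount_filterMap_rot 2 'u' 'd' (pvRot_iff 2 'u' 'd' (by decide) (by intro c hc; fin_cases hc; all_goals decide)) _
  have e2 : (code.toList.filterMap (pvRot 2)).count 'U' = code.toList.count 'D' :=
    pvCount_filterMap_rot 2 'U' 'D' (pvRot_iff 2 'U' 'D' (by decide) (by intro c hc; fin_cases hc; all_goals decide)) _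
  have e3 : (code.toList.filterMap (pvRot 2)).count 'r' = code.toList.count 'l' :=
    pvCount_filterMap_rot 2 'r' 'l' (pvRot_iff 2 'r' 'l' (by decide) (by intro c hc; fin_cases hc; all_goals decide)) _
  have e4 : (code.toList.filterMap (pvRot 2)).count 'R' = code.toList.count 'L' :=
    pvCount_filterMap_rot 2 'R' 'L' (pvRot_iff 2 'R' 'L' (by decide) (by intro c hc; fin_cases hc; all_goals decide)) _
  have e5 : (code.toList.filterMap (pvRot 2)).count 'd' = code.toList.count 'u' :=
    pvCount_filterMap_rot 2 'd' 'u' (pvRot_iff 2 'd' 'u' (by decide) (by intro c hc; fin_cases hc; all_goals decide)) _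
  have e6 : (code.toList.filterMap (pvRot 2)).count 'D' = code.toList.count 'U' :=
    pvCount_filterMap_rot 2 'D' 'U' (pvRot_iff 2 'D' 'U' (by decide) (by intro c hc; fin_cases hc; all_goals decide)) _
  have e7 : (code.toList.filterMap (pvRot 2)).count 'l' = code.toList.count 'r' :=
    pvCount_filterMap_rot 2 'l' 'r' (pvRot_iff 2 'l' 'r' (by decide) (by intro c hc; fin_cases hc; all_goals decide)) _
  have e8 : (code.toList.filterMap (pvRot 2)).count 'L' = code.toList.count 'R' :=
    pvCount_filterMap_rot 2 'L' 'R' (pvRot_iff 2 'L' 'R' (by decide) (by intro c hc; fin_cases hc; all_goals decide)) _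
  simp [pvRotatedB, pvCanon, pvBlocks, pvEight, List.range_succ, hg, e1, e2, e3, e4, e5, e6, e7, e8,
        List.getD]

lemma pvB3 (code : String) :
    pvRotatedB (pvCountsB code) 3 =
      String.ofList (pvCanon (fun c => (code.toList.filterMap (pvRot 3)).count c)) := by
  have hg : ∀ c, (pvCountsB code).getD c 0 = (code.toList.count c : Int) := pvGetD_countsB code
  have e1 : (code.toList.filterMap (pvRot 3)).count 'u' = code.toList.count 'r' :=
    pvCount_filterMap_rot 3 'u' 'r' (pvRot_iff 3 'u' 'r' (by decide) (by intro c hc; fin_cases hc; all_goals decide)) _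
  have e2 : (code.toList.filterMap (pvRot 3)).count 'U' = code.toList.count 'R' :=
    pvCount_filterMap_rot 3 'U' 'R' (pvRot_iff 3 'U' 'R' (by decide) (by intro c hc; fin_cases hc; all_goals decide)) _
  have e3 : (code.toList.filterMap (pvRot 3)).count 'r' = code.toList.count 'd' :=
    pvCount_filterMap_rot 3 'r' 'd' (pvRot_iff 3 'r' 'd' (by decide) (by intro c hc; fin_cases hc; all_goals decide)) _
  have e4 : (code.toList.filterMap (pvRot 3)).count 'R' = code.toList.count 'D' :=
    pvCount_filterMap_rot 3 'R' 'D' (pvRot_iff 3 'R' 'D' (by decide) (by intro c hc; fin_cases hc; all_goals decide)) _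
  have e5 : (code.toList.filterMap (pvRot 3)).count 'd' = code.toList.count 'l' :=
    pvCount_filterMap_rot 3 'd' 'l' (pvRot_iff 3 'd' 'l' (by decide) (by intro c hc; fin_cases hc; all_goals decide)) _
  have e6 : (code.toList.filterMap (pvRot 3)).count 'D' = code.toList.count 'L' :=
    pvCount_filterMap_rot 3 'D' 'L' (pvRot_iff 3 'D' 'L' (by decide) (by intro c hc; fin_cases hc; all_goals decide)) _
  have e7 : (code.toList.filterMap (pvRot 3)).count 'l' = code.toList.count 'u' :=
    pvCount_filterMap_rot 3 'l' 'u' (pvRot_iff 3 'l' 'u' (by decide) (by intro c hc; fin_cases hc; all_goals decide)) _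
  have e8 : (code.toList.filterMap (pvRot 3)).count 'L' = code.toList.count 'U' :=
    pvCount_filterMap_rot 3 'L' 'U' (pvRot_iff 3 'L' 'U' (by decide) (by intro c hc; fin_cases hc; all_goals decide)) _
  simp [pvRotatedB, pvCanon, pvBlocks, pvEight, List.range_succ, hg, e1, e2, e3, e4, e5, e6, e7, e8,
        List.getD]

theorem pvMain (code : String) :
    make_all_rotations_of_tile code = make_all_rotations_of_tile_alt code := by
  have hmem : ∀ k : Nat, ∀ c ∈ code.toList.filterMap (pvRot k), c ∈ pvEight := by
    intro k c hc
    rcases List.mem_filterMap.mp hc with ⟨a, _, ha⟩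
    exact pvRot_mem_eight ha
  simp only [make_all_rotations_of_tile, make_all_rotations_of_tile_alt]
  rw [pvLoopA code.toList [] [] []]
  simp only [List.nil_append]
  rw [pvSortedCanon _ (hmem 1), pvSortedCanon _ (hmem 2), pvSortedCanon _ (hmem 3),
      pvB1 code, pvB2 code, pvB3 code]

-- ===== VERDICT (by name: the statement is the Claim_ definition above) =====
theorem make_all_rotations_of_tile_spec : Claim_equal_make_all_rotations_of_tile := by
  intro code _
  exact pvMain code
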